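-- pv_equiv track=rewrite | github.com/Maxython/RUBOM | modules.py | is_eng
-- ===== SOURCE A (Python) =====
-- def is_eng(text):
--     sl = 'qwertyuiopasdfghjklzxcvbnm'
--     ch = '1234567890'
--     ch_pr = True
--     for i in text:
--         if i.lower() in ch:
--             if ch_pr == True:
--                 type = False
--         elif i.lower() in sl:
--             type = True
--             ch_pr = False
--         else:
--             type = False
--     return type
-- ===== SOURCE B (Python) =====
-- def is_eng(text):
--     # right-to-left scan: the rightmost non-digit char decides (letter -> True,
--     # other -> False); an all-digit text is False; empty text leaves `res`
--     # unassigned and raises UnboundLocalError, like A.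
--     for i in reversed(text):
--         c = i.lower()
--         if c in 'qwertyuiopasdfghjklzxcvbnm':
--             res = True
--             break
--         if c in '1234567890':
--             res = False
--             continue
--         res = False
--         break
--     return res
-- ===== Notes on version B (the rewrite author's own statement) =====
-- stated objective: faster
-- what changed: B scans the text right-to-left and stops at the first decisive character (rightmost non-digit), dropping A's ch_pr flag and its full left-to-right pass over every character.
-- outside the precondition, e.g. on is_eng(''): A raises UnboundLocalError, B raises UnboundLocalError
import Mathlib
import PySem

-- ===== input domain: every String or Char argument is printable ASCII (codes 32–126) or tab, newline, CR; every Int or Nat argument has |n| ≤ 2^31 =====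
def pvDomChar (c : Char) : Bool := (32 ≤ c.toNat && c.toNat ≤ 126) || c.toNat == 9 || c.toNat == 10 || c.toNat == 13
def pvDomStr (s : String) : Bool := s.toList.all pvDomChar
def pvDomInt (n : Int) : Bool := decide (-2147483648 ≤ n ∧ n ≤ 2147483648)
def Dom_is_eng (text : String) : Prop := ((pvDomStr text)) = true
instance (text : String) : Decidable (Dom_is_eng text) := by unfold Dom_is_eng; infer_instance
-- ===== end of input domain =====

-- B replaces A's left-to-right scan with flag by a right-to-left scan that stops at the
-- first decisive char (alternative decomposition; Pre_ excludes the empty string, on which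
-- the Python A (and B) raises UnboundLocalError).


-- ===== PORT A =====
-- `i.lower() in '1234567890'` on the 1-char string i is char membership (exact for a single char)
def isEngDigit (c : Char) : Bool := ("1234567890".toList).contains (PySem.Chars.lowerChar c)
def isEngLetter (c : Char) : Bool := ("qwertyuiopasdfghjklzxcvbnm".toList).contains (PySem.Chars.lowerChar c)

-- state = (ch_pr, type); `type` is Option Bool: none = not yet assigned (UnboundLocalError,
-- outside Pre_; the port returns false there)
def isEngStep (st : Bool × Option Bool) (c : Char) : Bool × Option Bool :=
  if isEngDigit c then
    if st.1 = true then (st.1, some false) else st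
  else if isEngLetter c then (false, some true)
  else (st.1, some false)

def is_eng (text : String) : Bool :=
  ((text.toList.foldl isEngStep (true, none)).2).getD false

-- ===== PORT B =====
-- loop over reversed(text); digit assigns false and continues (overridden if a decisive
-- char is found further left), letter/other break; none = `res` never assigned
def isEngAltLoop : List Char → Option Bool
  | [] => none
  | c :: rest =>
    if isEngLetter c then some true
    else if isEngDigit c then some ((isEngAltLoop rest).getD false)
    else some false

def is_eng_alt (text : String) : Bool :=
  (isEngAltLoop text.toList.reverse).getD false

-- ===== PRECONDITION & SPEC =====
-- Pre_ excludes only the empty string, on which Python A raises UnboundLocalError (B too)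
def Pre_is_eng (text : String) : Prop := text ≠ ""
instance (text : String) : Decidable (Pre_is_eng text) := by unfold Pre_is_eng; infer_instance
def pvWitness_is_eng : String := "ab1"

def Spec_is_eng (text : String) (out : Bool) : Prop := out = is_eng_alt text
instance (text : String) (out : Bool) : Decidable (Spec_is_eng text out) := by unfold Spec_is_eng; infer_instance

-- ===== CLAIM (what is proved, stated in full; the proofs are below) =====
def Claim_equal_is_eng : Prop := ∀ (text : String), Dom_is_eng text → Pre_is_eng text → Spec_is_eng text (is_eng text)

-- ===== LEMMAS AND PROOFS =====

def isEngHasLetter (l : List Char) : Bool := l.any isEngLetter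

-- if no letter occurs, B's loop never returns true
theorem isEngAltLoop_no_letter (l : List Char) (h : isEngHasLetter l = false) :
    (isEngAltLoop l).getD false = false := by
  induction l with
  | nil => rfl
  | cons c rest ih =>
    simp only [isEngHasLetter, List.any_cons, Bool.or_eq_false_iff] at h
    simp only [isEngAltLoop, h.1, Bool.false_eq_true, if_false]
    split_ifs with hd
    · simpa using ih (by simpa [isEngHasLetter] using h.2)
    · rfl

-- B's loop returns some on any nonempty list
theorem isEngAltLoop_isSome (c : Char) (rest : List Char) :
    (isEngAltLoop (c :: rest)).isSome = true := by
  simp only [isEngAltLoop]; split_ifs <;> simp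

-- a digit char is never a letter char
theorem isEng_digit_not_letter (c : Char) (hd : isEngDigit c = true) :
    isEngLetter c = false := by
  have hmem : PySem.Chars.lowerChar c ∈ "1234567890".toList := by
    simpa [isEngDigit] using hd
  unfold isEngLetter
  simp only [show "1234567890".toList = ['1','2','3','4','5','6','7','8','9','0'] from rfl,
    List.mem_cons, List.not_mem_nil, or_false] at hmem
  rcases hmem with h|h|h|h|h|h|h|h|h|h <;> rw [h] <;> decide

-- main invariant: A's fold state mirrors B's reversed scan
theorem isEng_fold_eq_altLoop (l : List Char) :
    l.foldl isEngStep (true, none) =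
      (!isEngHasLetter l, isEngAltLoop l.reverse) := by
  induction l using List.reverseRecOn with
  | nil => rfl
  | append_singleton l c ih =>
    rw [List.foldl_append, ih]
    simp only [List.foldl_cons, List.foldl_nil, List.reverse_append, List.reverse_singleton,
      List.singleton_append]
    by_cases hd : isEngDigit c
    · have hnl : isEngLetter c = false := isEng_digit_not_letter c hd
      have hA : isEngHasLetter (l ++ [c]) = isEngHasLetter l := by
        simp [isEngHasLetter, hnl]
      have hAlt : isEngAltLoop (c :: l.reverse) = some ((isEngAltLoop l.reverse).getD false) := by
        simp [isEngAltLoop, hnl, hd]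
      rw [hA, hAlt]
      simp only [isEngStep, hd, if_true]
      cases hL : isEngHasLetter l with
      | false =>
        have h0 := isEngAltLoop_no_letter l.reverse
          (by simpa [isEngHasLetter, List.any_reverse] using hL)
        simp [h0]
      | true =>
        have hne : l ≠ [] := by rintro rfl; simp [isEngHasLetter] at hL
        cases hrev : l.reverse with
        | nil => exact absurd (List.reverse_eq_nil_iff.mp hrev) hne
        | cons a as =>
          have hs := isEngAltLoop_isSome a as
          rw [← hrev] at hs
          obtain ⟨b, hb⟩ := Option.isSome_iff_exists.mp hs
          rw [hrev] at hb
          simp [hb]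
    · by_cases hl : isEngLetter c
      · simp [isEngStep, hd, hl, isEngAltLoop, isEngHasLetter]
      · simp [isEngStep, hd, hl, isEngAltLoop, isEngHasLetter]

-- ===== VERDICT (by name: the statement is the Claim_ definition above) =====
theorem is_eng_spec : Claim_equal_is_eng := by
  intro text _ _
  unfold Spec_is_eng is_eng is_eng_alt
  rw [isEng_fold_eq_altLoop]
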